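-- pv_equiv track=rewrite | github.com/feltroidprime/builtins-hints | research/tools.py | polynomial_multiplication_terms
-- ===== SOURCE A (Python) =====
-- def polynomial_multiplication_terms(n_limbs):
--     result = []
--     for i in range(2 * n_limbs - 1):
--         if i < n_limbs:
--             result.append(i + 1)
--         else:
--             result.append(2 * n_limbs - i - 1)
--     return result
-- ===== SOURCE B (Python) =====
-- def polynomial_multiplication_terms(n_limbs):
--     # Difference-array formulation: the term counts are the running prefix
--     # sums of n_limbs steps of +1 followed by n_limbs-1 steps of -1.
--     deltas = [1] * max(n_limbs, 0) + [-1] * max(n_limbs - 1, 0)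
--     result = []
--     total = 0
--     for d in deltas:
--         total += d
--         result.append(total)
--     return result
-- ===== Notes on version B (the rewrite author's own statement) =====
-- stated objective: alternative
-- what changed: Replaces the index loop that branches on i < n_limbs and computes each term from its index by a difference-array formulation: build a list of +1/-1 steps and emit its running prefix sums.
import Mathlib
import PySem

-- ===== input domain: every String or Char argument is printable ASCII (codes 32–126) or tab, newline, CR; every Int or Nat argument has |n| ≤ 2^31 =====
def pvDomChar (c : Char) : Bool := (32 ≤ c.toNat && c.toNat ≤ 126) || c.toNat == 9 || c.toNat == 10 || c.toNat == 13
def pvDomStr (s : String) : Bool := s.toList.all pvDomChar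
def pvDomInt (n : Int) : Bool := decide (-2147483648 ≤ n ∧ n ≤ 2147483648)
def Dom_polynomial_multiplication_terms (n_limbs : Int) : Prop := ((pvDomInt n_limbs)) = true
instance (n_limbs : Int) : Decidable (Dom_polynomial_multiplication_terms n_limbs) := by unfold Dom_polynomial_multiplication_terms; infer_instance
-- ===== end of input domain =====

-- B builds the triangle [1..n..1] as the running prefix sums of a +1/-1 difference array instead of computing each term from its index with a branch; objective: alternative.

-- ===== PORT A =====
def polynomial_multiplication_terms (n_limbs : Int) : List Int :=
  (PySem.List.pyRange 0 (2 * n_limbs - 1) 1).foldl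
    (fun result i =>
      if i < n_limbs then result ++ [i + 1]
      else result ++ [2 * n_limbs - i - 1]) []

-- ===== PORT B =====
def polynomial_multiplication_terms_alt (n_limbs : Int) : List Int :=
  ((List.replicate (max n_limbs 0).toNat (1 : Int)
      ++ List.replicate (max (n_limbs - 1) 0).toNat (-1 : Int)).foldl
    (fun (p : List Int × Int) d => (p.1 ++ [p.2 + d], p.2 + d)) ([], 0)).1

-- ===== PRECONDITION & SPEC =====
def Spec_polynomial_multiplication_terms (n_limbs : Int) (out : List Int) : Prop := out = polynomial_multiplication_terms_alt n_limbs
instance (n_limbs : Int) (out : List Int) : Decidable (Spec_polynomial_multiplication_terms n_limbs out) := by unfold Spec_polynomial_multiplication_terms; infer_instance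

-- ===== CLAIM =====
def Claim_equal_polynomial_multiplication_terms : Prop := ∀ (n_limbs : Int), Dom_polynomial_multiplication_terms n_limbs → Spec_polynomial_multiplication_terms n_limbs (polynomial_multiplication_terms n_limbs)

-- ===== LEMMAS AND PROOFS =====

theorem pv_foldl_ite_as_map (n : Int) (l : List Int) (acc : List Int) :
    l.foldl (fun result i => if i < n then result ++ [i + 1] else result ++ [2 * n - i - 1]) acc
      = acc ++ l.map (fun i => if i < n then i + 1 else 2 * n - i - 1) := by
  induction l generalizing acc with
  | nil => simp
  | cons x xs ih => by_cases h : x < n <;> simp [List.foldl, h, ih]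

-- Prefix sums of m steps of +1 starting from total t.
theorem pv_psum_rep_one (m : ℕ) (acc : List Int) (t : Int) :
    (List.replicate m (1 : Int)).foldl
        (fun (p : List Int × Int) d => (p.1 ++ [p.2 + d], p.2 + d)) (acc, t)
      = (acc ++ (List.range m).map (fun k : ℕ => t + (k : Int) + 1), t + m) := by
  induction m generalizing acc t with
  | zero => simp
  | succ m ih =>
      rw [List.replicate_succ, List.foldl_cons, ih]
      have h1 : (List.range (m + 1)).map (fun k : ℕ => t + (k : Int) + 1)
          = (t + 1) :: (List.range m).map (fun k : ℕ => (t + 1) + (k : Int) + 1) := by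
        rw [List.range_succ_eq_map, List.map_cons, List.map_map]
        congr 1
        · norm_num
        · apply List.map_congr_left
          intro a _
          simp only [Function.comp, Nat.succ_eq_add_one]
          push_cast; ring
      rw [h1]
      simp only [Prod.mk.injEq]
      exact ⟨by simp, by push_cast; ring⟩

-- Prefix sums of m steps of -1 starting from total t.
theorem pv_psum_rep_negone (m : ℕ) (acc : List Int) (t : Int) :
    (List.replicate m (-1 : Int)).foldl
        (fun (p : List Int × Int) d => (p.1 ++ [p.2 + d], p.2 + d)) (acc, t)
      = (acc ++ (List.range m).map (fun k : ℕ => t - (k : Int) - 1), t - m) := by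
  induction m generalizing acc t with
  | zero => simp
  | succ m ih =>
      rw [List.replicate_succ, List.foldl_cons, ih]
      have h1 : (List.range (m + 1)).map (fun k : ℕ => t - (k : Int) - 1)
          = (t - 1) :: (List.range m).map (fun k : ℕ => (t - 1) - (k : Int) - 1) := by
        rw [List.range_succ_eq_map, List.map_cons, List.map_map]
        congr 1
        · norm_num
        · apply List.map_congr_left
          intro a _
          simp only [Function.comp, Nat.succ_eq_add_one]
          push_cast; ring
      rw [h1]
      simp only [Prod.mk.injEq]
      refine ⟨by simp [show t + -1 = t - 1 from by ring], by push_cast; ring⟩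

-- Closed form of B: the branched map over the index range, same as A computes.
theorem pv_alt_closed (n : Int) :
    polynomial_multiplication_terms_alt n
      = (List.range (2 * n - 1).toNat).map
          (fun k : ℕ => if (k : Int) < n then (k : Int) + 1 else 2 * n - (k : Int) - 1) := by
  unfold polynomial_multiplication_terms_alt
  rw [List.foldl_append, pv_psum_rep_one, pv_psum_rep_negone]
  by_cases h : n ≤ 0
  · rw [show (max n 0).toNat = 0 by omega, show (max (n - 1) 0).toNat = 0 by omega,
      show (2 * n - 1).toNat = 0 by omega]
    simp
  · rw [show (max n 0).toNat = n.toNat by omega,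
      show (max (n - 1) 0).toNat = (n - 1).toNat by omega,
      show (2 * n - 1).toNat = n.toNat + (n - 1).toNat by omega,
      List.range_add, List.map_append, List.map_map, List.nil_append]
    dsimp only
    congr 1
    · apply List.map_congr_left
      intro k hk
      simp only [List.mem_range] at hk
      split_ifs <;> omega
    · apply List.map_congr_left
      intro k hk
      simp only [List.mem_range] at hk
      simp only [Function.comp]
      split_ifs <;> omega

-- ===== VERDICT =====
theorem polynomial_multiplication_terms_spec : Claim_equal_polynomial_multiplication_terms := by
  intro n _
  unfold Spec_polynomial_multiplication_terms polynomial_multiplication_terms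
  rw [pv_foldl_ite_as_map, List.nil_append, pv_alt_closed,
    PySem.List.pyRange_one, List.map_map,
    show (2 * n - 1 - 0 : Int) = 2 * n - 1 from by ring]
  apply List.map_congr_left
  intro k hk
  simp [Function.comp]
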